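-- pv_equiv track=rewrite | github.com/pypi-data/pypi-mirror-404 | packages/querycraft/querycraft-0.0.80.tar.gz/querycraft-0.0.80/querycraft/tools.py | clamp_widths
-- ===== SOURCE A (Python) =====
-- MAX_TABLE_WIDTH = 160  # Largeur maximale autorisée (bordures comprises)
--
-- MIN_COLUMN_WIDTH = 8  # Permet d’afficher au moins « a… »
--
-- def clamp_widths(widths, max_data_width, table_size=MAX_TABLE_WIDTH, min_col_width=MIN_COLUMN_WIDTH):
--     """Réduit les largeurs de colonnes jusqu’à rentrer dans la contrainte globale."""
--     total = sum(widths)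
--     if total <= max_data_width:
--         return widths
--
--     reducible = sum(max(0, w - min_col_width) for w in widths)
--     deficit = total - max_data_width
--     if reducible < deficit:
--         raise ValueError(
--             f"Impossible de faire tenir le tableau dans {table_size} caractères "
--             "(trop de colonnes ou contenus trop larges)."
--         )
--
--     widths = widths[:]
--     while deficit > 0:
--         for idx in sorted(range(len(widths)), key=lambda i: widths[i], reverse=True):
--             if widths[idx] > min_col_width:
--                 widths[idx] -= 1
--                 deficit -= 1
--                 if deficit == 0:
--                     break
--     return widths
-- ===== SOURCE B (Python) =====
-- MAX_TABLE_WIDTH = 160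
--
-- MIN_COLUMN_WIDTH = 8
--
--
-- def clamp_widths(widths, max_data_width, table_size=MAX_TABLE_WIDTH, min_col_width=MIN_COLUMN_WIDTH):
--     """Water-filling: binary-search the per-column reduction level k, then
--     hand one extra unit each to the 'rem' widest reducible columns."""
--     total = sum(widths)
--     if total <= max_data_width:
--         return widths
--     deficit = total - max_data_width
--     caps = [max(0, w - min_col_width) for w in widths]
--     if sum(caps) < deficit:
--         raise ValueError(
--             f"Impossible de faire tenir le tableau dans {table_size} caractères "
--             "(trop de colonnes ou contenus trop larges)."
--         )
--
--     def shaved(k):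
--         # total amount removed by k complete rounds of one-per-column shaving
--         return sum(min(k, c) for c in caps)
--
--     # largest k with shaved(k) < deficit; invariant shaved(lo) < deficit <= shaved(hi)
--     lo, hi = 0, max(caps)
--     while hi - lo > 1:
--         mid = (lo + hi) // 2
--         if shaved(mid) < deficit:
--             lo = mid
--         else:
--             hi = mid
--     k = lo
--     rem = deficit - shaved(k)
--     order = sorted((i for i in range(len(caps)) if caps[i] > k), key=lambda i: -caps[i])
--     extra = set(order[:rem])
--     return [w - min(k, c) - (1 if i in extra else 0)
--             for i, (w, c) in enumerate(zip(widths, caps))]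
-- ===== Notes on version B (the rewrite author's own statement) =====
-- stated objective: alternative
-- what changed: A repeatedly re-sorts the columns and shaves one character per column per pass until the deficit is gone; B binary-searches the uniform shaving level k, sorts the reducible columns once, and hands the remaining units to the widest columns in one shot.
import Mathlib
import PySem

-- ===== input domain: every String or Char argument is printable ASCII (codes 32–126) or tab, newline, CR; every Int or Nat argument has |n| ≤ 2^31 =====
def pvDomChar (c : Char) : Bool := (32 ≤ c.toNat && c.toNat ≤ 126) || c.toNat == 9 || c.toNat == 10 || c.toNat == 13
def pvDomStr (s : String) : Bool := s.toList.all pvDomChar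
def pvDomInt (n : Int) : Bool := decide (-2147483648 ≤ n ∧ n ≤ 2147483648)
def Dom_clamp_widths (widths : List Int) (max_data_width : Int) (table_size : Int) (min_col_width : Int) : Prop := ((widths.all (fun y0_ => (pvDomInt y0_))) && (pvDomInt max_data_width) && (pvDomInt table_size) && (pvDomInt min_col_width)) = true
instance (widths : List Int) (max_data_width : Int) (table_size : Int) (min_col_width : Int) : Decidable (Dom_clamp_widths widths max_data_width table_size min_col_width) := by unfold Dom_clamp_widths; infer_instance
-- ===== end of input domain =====

-- B replaces A's pass-by-pass re-sort-and-shave loop by one binary search for the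
-- shaving level plus a single sort of the reducible columns (objective: alternative).


-- ===== PORT A =====
-- A-side helpers.  cwPass is one sweep of the inner `for` loop: indices sorted by
-- decreasing current width (Python's stable `sorted(..., reverse=True)`); a spent
-- deficit (s.2 = 0) makes the remaining iterations no-ops, which models `break`
-- exactly; all indices come from `range len(widths)`, so `getD _ 0` is Python's
-- in-range `widths[idx]`.  cwLoop is the `while deficit > 0` loop, totalised with
-- fuel: on the admitted inputs every pass retires at least one unit of deficit, so
-- `deficit + 1` passes always suffice.
def cwPass (min_col_width : Int) (st : List Int × Int) : List Int × Int :=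
  (PySem.List.sorted (List.range st.1.length) (fun i => st.1.getD i 0) true).foldl
    (fun s idx =>
      if s.2 = 0 then s
      else if s.1.getD idx 0 > min_col_width then (s.1.set idx (s.1.getD idx 0 - 1), s.2 - 1)
      else s) st

def cwLoop (fuel : Nat) (min_col_width : Int) (st : List Int × Int) : List Int :=
  match fuel with
  | 0 => st.1
  | fuel + 1 => if st.2 > 0 then cwLoop fuel min_col_width (cwPass min_col_width st) else st.1


def clamp_widths (widths : List Int) (max_data_width : Int) (table_size : Int) (min_col_width : Int) : List Int :=
  let total := widths.sum
  if total ≤ max_data_width then widths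
  else
    let reducible := (widths.map (fun w => max 0 (w - min_col_width))).sum
    let deficit := total - max_data_width
    if reducible < deficit then widths  -- Python raises ValueError here; excluded by Pre_
    else cwLoop (deficit.toNat + 1) min_col_width (widths, deficit)

-- ===== PORT B =====
-- B-side helpers.  cwShaved is Source B's shaved(k); cwSearch is its `while hi - lo > 1`
-- binary search, totalised with fuel (the bracket shrinks every step, so `hi - lo`
-- steps always suffice).
def cwShaved (caps : List Int) (k : Int) : Int := (caps.map (fun c => min k c)).sum

def cwSearch (fuel : Nat) (caps : List Int) (deficit lo hi : Int) : Int :=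
  match fuel with
  | 0 => lo
  | fuel + 1 =>
    if hi - lo > 1 then
      let mid := PySem.Int.floordiv (lo + hi) 2
      if cwShaved caps mid < deficit then cwSearch fuel caps deficit mid hi
      else cwSearch fuel caps deficit lo mid
    else lo


-- `enumerate(zip(widths, caps))` is ported with Nat indices (List.zipIdx); the
-- indices are the same nonnegative integers Python uses.
def clamp_widths_alt (widths : List Int) (max_data_width : Int) (table_size : Int) (min_col_width : Int) : List Int :=
  let total := widths.sum
  if total ≤ max_data_width then widths
  else
    let deficit := total - max_data_width
    let caps := widths.map (fun w => max 0 (w - min_col_width))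
    if caps.sum < deficit then widths  -- Python raises ValueError here; excluded by Pre_
    else
      let hi := (PySem.List.max? caps (fun c => c)).getD 0  -- max(caps); caps ≠ [] on admitted inputs
      let k := cwSearch (hi - 0).toNat caps deficit 0 hi
      let rem := deficit - cwShaved caps k
      let order := PySem.List.sorted
        ((List.range caps.length).filter (fun i => decide (caps.getD i 0 > k)))
        (fun i => -(caps.getD i 0)) false
      let extra := PySem.Set.ofList (order.take rem.toNat)  -- rem > 0 here, so order[:rem] is take
      ((widths.zip caps).zipIdx).map
        (fun p => p.1.1 - min k p.1.2 - (if p.2 ∈ extra then 1 else 0))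

-- ===== PRECONDITION & SPEC =====
-- Pre_ excludes exactly the inputs where Python's A raises ValueError (the widths
-- cannot be shrunk enough): the deficit must not exceed the total reducible slack.
def Pre_clamp_widths (widths : List Int) (max_data_width : Int) (table_size : Int) (min_col_width : Int) : Prop :=
  widths.sum ≤ max_data_width ∨
    widths.sum - max_data_width ≤ (widths.map (fun w => max 0 (w - min_col_width))).sum
instance (widths : List Int) (max_data_width : Int) (table_size : Int) (min_col_width : Int) : Decidable (Pre_clamp_widths widths max_data_width table_size min_col_width) := by unfold Pre_clamp_widths; infer_instance

def pvWitness_clamp_widths : List Int × Int × Int × Int := ([20, 9, 3], 20, 160, 8)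

def Spec_clamp_widths (widths : List Int) (max_data_width : Int) (table_size : Int) (min_col_width : Int) (out : List Int) : Prop := out = clamp_widths_alt widths max_data_width table_size min_col_width
instance (widths : List Int) (max_data_width : Int) (table_size : Int) (min_col_width : Int) (out : List Int) : Decidable (Spec_clamp_widths widths max_data_width table_size min_col_width out) := by unfold Spec_clamp_widths; infer_instance

-- ===== CLAIM (what is proved, stated in full; the proofs are below) =====
def Claim_equal_clamp_widths : Prop := ∀ (widths : List Int) (max_data_width : Int) (table_size : Int) (min_col_width : Int), Dom_clamp_widths widths max_data_width table_size min_col_width → Pre_clamp_widths widths max_data_width table_size min_col_width → Spec_clamp_widths widths max_data_width table_size min_col_width (clamp_widths widths max_data_width table_size min_col_width)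

-- ===== LEMMAS AND PROOFS =====

def cwDec (ws : List Int) (T : List Nat) : List Int :=
  T.foldl (fun a i => a.set i (a.getD i 0 - 1)) ws

theorem cwDec_length (T : List Nat) (ws : List Int) : (cwDec ws T).length = ws.length := by
  induction T generalizing ws with
  | nil => rfl
  | cons a t ih => simpa [cwDec] using ih (ws.set a (ws.getD a 0 - 1))

theorem cwDec_getD (T : List Nat) (ws : List Int) (hnd : T.Nodup)
    (hb : ∀ j ∈ T, j < ws.length) (i : Nat) :
    (cwDec ws T).getD i 0 = ws.getD i 0 - (if i ∈ T then 1 else 0) := by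
  induction T generalizing ws with
  | nil => simp [cwDec]
  | cons a t ih =>
    have ha : a < ws.length := hb a (by simp)
    have hnd' := (List.nodup_cons.mp hnd).2
    have hna : a ∉ t := (List.nodup_cons.mp hnd).1
    have hb' : ∀ j ∈ t, j < (ws.set a (ws.getD a 0 - 1)).length := by
      intro j hj; simpa using hb j (by simp [hj])
    have := ih (ws.set a (ws.getD a 0 - 1)) hnd' hb' 
    rw [show cwDec ws (a :: t) = cwDec (ws.set a (ws.getD a 0 - 1)) t from rfl, this]
    by_cases hia : i = a
    · subst hia
      simp [hna, List.getD, ha]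
    · have : (ws.set a (ws.getD a 0 - 1)).getD i 0 = ws.getD i 0 := by
        simp [List.getD, List.getElem?_set_ne (by omega : a ≠ i)]
      rw [this]
      simp [List.mem_cons, hia]

def cwStep (minw : Int) (s : List Int × Int) (idx : Nat) : List Int × Int :=
  if s.2 = 0 then s
  else if s.1.getD idx 0 > minw then (s.1.set idx (s.1.getD idx 0 - 1), s.2 - 1)
  else s

-- fold with zero deficit is the identity
theorem cwFold_zero (minw : Int) (σ : List Nat) (ws : List Int) :
    σ.foldl (cwStep minw) (ws, 0) = (ws, 0) := by
  induction σ with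
  | nil => rfl
  | cons a t ih => simpa [cwStep] using ih

theorem cwFold_char (minw : Int) (σ : List Nat) (ws : List Int) (d : Int)
    (hnd : σ.Nodup) (hb : ∀ j ∈ σ, j < ws.length) (hd : 0 ≤ d) :
    σ.foldl (cwStep minw) (ws, d) =
    (cwDec ws ((σ.filter (fun i => decide (ws.getD i 0 > minw))).take d.toNat),
      d - ((σ.filter (fun i => decide (ws.getD i 0 > minw))).take d.toNat).length) := by
  induction σ generalizing ws d with
  | nil => simp [cwDec]
  | cons a t ih =>
    have hna : a ∉ t := (List.nodup_cons.mp hnd).1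
    have hnd' := (List.nodup_cons.mp hnd).2
    by_cases hd0 : d = 0
    · subst hd0
      simp only [List.foldl_cons]
      rw [show cwStep minw (ws,0) a = (ws,0) by simp [cwStep]]
      rw [show (0:Int).toNat = 0 from rfl]
      simpa [cwDec] using cwFold_zero minw t ws
    · have hdpos : 0 < d := lt_of_le_of_ne hd (Ne.symm hd0)
      by_cases hra : ws.getD a 0 > minw
      · -- a is decremented
        have hra2 : minw < ws[a]?.getD 0 := by simpa [List.getD] using hra
        have hstep : List.foldl (cwStep minw) (ws, d) (a :: t) =
            List.foldl (cwStep minw) (ws.set a (ws.getD a 0 - 1), d - 1) t := by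
          simp [cwStep, hd0, hra2]
        rw [hstep]
        have hb' : ∀ j ∈ t, j < (ws.set a (ws.getD a 0 - 1)).length := by
          intro j hj; simpa using hb j (by simp [hj])
        rw [ih (ws.set a (ws.getD a 0 - 1)) (d - 1) hnd' hb' (by omega)]
        have hfe : t.filter (fun i => decide ((ws.set a (ws.getD a 0 - 1)).getD i 0 > minw))
            = t.filter (fun i => decide (ws.getD i 0 > minw)) := by
          apply List.filter_congr
          intro x hx
          have hxa : a ≠ x := fun h => hna (h ▸ hx)
          simp [List.getD, List.getElem?_set_ne hxa]
        rw [hfe]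
        have htn : d.toNat = (d - 1).toNat + 1 := by omega
        rw [show (a :: t).filter (fun i => decide (ws.getD i 0 > minw))
              = a :: t.filter (fun i => decide (ws.getD i 0 > minw)) by simp [hra2]]
        rw [htn, List.take_succ_cons]
        simp only [cwDec, List.foldl_cons, Prod.mk.injEq, List.length_cons]
        exact ⟨trivial, by push_cast; omega⟩
      · -- a is skipped
        have hra2 : ¬ minw < ws[a]?.getD 0 := by simpa [List.getD] using hra
        have hstep : List.foldl (cwStep minw) (ws, d) (a :: t) =
            List.foldl (cwStep minw) (ws, d) t := by
          simp [cwStep, hd0, hra2]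
        rw [hstep, ih ws d hnd' (fun j hj => hb j (by simp [hj])) hd]
        rw [show (a :: t).filter (fun i => decide (ws.getD i 0 > minw))
              = t.filter (fun i => decide (ws.getD i 0 > minw)) by simp [hra2]]

def cwCapsOf (widths : List Int) (minw : Int) : List Int :=
  widths.map (fun w => max 0 (w - minw))

def cwWsAt (widths : List Int) (minw p : Int) : List Int :=
  widths.map (fun w => w - min p (max 0 (w - minw)))

def cwR (caps : List Int) (p : Int) : Int :=
  ((caps.filter (fun c => decide (c > p))).length : Int)

theorem caps_nonneg (w : List Int) (minw : Int) : ∀ c ∈ cwCapsOf w minw, 0 ≤ c := by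
  intro c hc
  simp [cwCapsOf] at hc
  obtain ⟨x, _, hx⟩ := hc
  omega

theorem caps_getD (w : List Int) (minw : Int) (i : Nat) (hi : i < w.length) :
    (cwCapsOf w minw).getD i 0 = max 0 (w.getD i 0 - minw) := by
  simp [cwCapsOf, List.getD, List.getElem?_map, List.getElem?_eq_getElem hi]

theorem wsAt_getD (w : List Int) (minw p : Int) (i : Nat) (hi : i < w.length) :
    (cwWsAt w minw p).getD i 0 = w.getD i 0 - min p ((cwCapsOf w minw).getD i 0) := by
  simp [cwWsAt, List.getD, List.getElem?_map, List.getElem?_eq_getElem hi, caps_getD w minw i hi,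
    cwCapsOf]

theorem wsAt_zero (w : List Int) (minw : Int) : cwWsAt w minw 0 = w := by
  unfold cwWsAt
  rw [show w = w.map id from (List.map_id w).symm]
  simp only [List.map_map, List.map_inj_left]
  intro x hx
  simp

theorem wsAt_length (w : List Int) (minw p : Int) : (cwWsAt w minw p).length = w.length := by
  simp [cwWsAt]

theorem red_iff (w : List Int) (minw p : Int) (hp : 0 ≤ p) (i : Nat) (hi : i < w.length) :
    ((cwWsAt w minw p).getD i 0 > minw ↔ (cwCapsOf w minw).getD i 0 > p) := by
  rw [wsAt_getD w minw p i hi, caps_getD w minw i hi]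
  omega

theorem shaved_mono (caps : List Int) {p q : Int} (h : p ≤ q) :
    cwShaved caps p ≤ cwShaved caps q := by
  unfold cwShaved
  apply List.sum_le_sum
  intro c hc
  simp; omega

theorem shaved_zero (caps : List Int) (h : ∀ c ∈ caps, 0 ≤ c) : cwShaved caps 0 = 0 := by
  unfold cwShaved
  rw [List.map_congr_left (g := fun _ => (0:Int)) (fun c hc => by have := h c hc; simp; omega)]
  simp

theorem shaved_top (caps : List Int) (hi : Int) (h : ∀ c ∈ caps, c ≤ hi) :
    cwShaved caps hi = caps.sum := by
  unfold cwShaved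
  rw [List.map_congr_left (g := fun c => c) (fun c hc => by have := h c hc; simp; omega)]
  simp

theorem shaved_succ (caps : List Int) (p : Int) (hp : 0 ≤ p) (h : ∀ c ∈ caps, 0 ≤ c) :
    cwShaved caps (p + 1) = cwShaved caps p + cwR caps p := by
  induction caps with
  | nil => simp [cwShaved, cwR]
  | cons c t ih =>
    have hc := h c (by simp)
    have ih' := ih (fun x hx => h x (by simp [hx]))
    by_cases hcp : c > p
    · have hfc : cwR (c :: t) p = cwR t p + 1 := by
        simp [cwR, List.filter_cons, hcp]
      simp only [cwShaved, List.map_cons, List.sum_cons] at ih' ⊢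
      rw [hfc]
      have hmin : min (p + 1) c = min p c + 1 := by omega
      omega
    · have hfc : cwR (c :: t) p = cwR t p := by
        simp [cwR, List.filter_cons, hcp]
      simp only [cwShaved, List.map_cons, List.sum_cons] at ih' ⊢
      rw [hfc]
      have hmin : min (p + 1) c = min p c := by omega
      omega

theorem cwR_nonneg (caps : List Int) (p : Int) : 0 ≤ cwR caps p := by
  simp [cwR]

theorem cwR_antitone (caps : List Int) {p q : Int} (h : p ≤ q) :
    cwR caps q ≤ cwR caps p := by
  unfold cwR
  induction caps with
  | nil => simp
  | cons c t ih =>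
    simp only [List.filter_cons]
    by_cases h1 : c > q
    · rw [decide_eq_true h1, decide_eq_true (by omega : c > p)]
      simpa using ih
    · rw [show decide (c > q) = false by simpa using h1]
      by_cases h2 : c > p
      · rw [decide_eq_true h2]
        have hih := ih
        simp at hih ⊢
        omega
      · rw [show decide (c > p) = false by simpa using h2]
        simpa using ih

theorem cwSearch_spec (caps : List Int) (D : Int) :
    ∀ (fuel : Nat) (lo hi : Int), cwShaved caps lo < D → D ≤ cwShaved caps hi →
      lo < hi → (hi - lo).toNat ≤ fuel →
      cwShaved caps (cwSearch fuel caps D lo hi) < D ∧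
        D ≤ cwShaved caps (cwSearch fuel caps D lo hi + 1) ∧
        lo ≤ cwSearch fuel caps D lo hi := by
  intro fuel
  induction fuel with
  | zero => intro lo hi _ _ hlt hf; omega
  | succ f ih =>
    intro lo hi hlo hhi hlt hf
    by_cases hgap : hi - lo > 1
    · have hmid : lo < PySem.Int.floordiv (lo + hi) 2 ∧ PySem.Int.floordiv (lo + hi) 2 < hi := by
        rw [PySem.Int.floordiv_eq_ediv_of_pos (by norm_num)]
        omega
      rw [show cwSearch (f + 1) caps D lo hi =
          (if cwShaved caps (PySem.Int.floordiv (lo + hi) 2) < D then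
            cwSearch f caps D (PySem.Int.floordiv (lo + hi) 2) hi
          else cwSearch f caps D lo (PySem.Int.floordiv (lo + hi) 2)) by
        simp [cwSearch, hgap]]
      by_cases hsm : cwShaved caps (PySem.Int.floordiv (lo + hi) 2) < D
      · rw [if_pos hsm]
        have h := ih (PySem.Int.floordiv (lo + hi) 2) hi hsm hhi (by omega) (by omega)
        exact ⟨h.1, h.2.1, by omega⟩
      · rw [if_neg hsm]
        exact ih lo (PySem.Int.floordiv (lo + hi) 2) hlo (by omega) (by omega) (by omega)
    · have h1 : hi = lo + 1 := by omega
      rw [show cwSearch (f + 1) caps D lo hi = lo by simp [cwSearch, hgap]]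
      exact ⟨hlo, by rw [← h1]; exact hhi, le_refl lo⟩

theorem shaved_add_nat (caps : List Int) (hnn : ∀ c ∈ caps, 0 ≤ c) (j : Int) (hj : 0 ≤ j)
    (hr : cwR caps j = 0) : ∀ m : Nat, cwShaved caps (j + m) = cwShaved caps j := by
  intro m
  induction m with
  | zero => simp
  | succ m ih =>
    have h1 : cwShaved caps (j + m + 1) = cwShaved caps (j + m) + cwR caps (j + m) := by
      exact shaved_succ caps (j + m) (by positivity) hnn
    have h2 : cwR caps (j + m) ≤ 0 := hr ▸ cwR_antitone caps (by omega)
    have h3 : 0 ≤ cwR caps (j + m) := cwR_nonneg caps _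
    have : ((m + 1 : Nat) : Int) = (m : Int) + 1 := by push_cast; ring
    rw [this, show j + ((m : Int) + 1) = j + m + 1 by ring, h1, ih]
    omega

theorem shaved_ge_self (caps : List Int) (hnn : ∀ c ∈ caps, 0 ≤ c) :
    ∀ m : Nat, (∀ j : Int, 0 ≤ j → j < m → 1 ≤ cwR caps j) → (m : Int) ≤ cwShaved caps m := by
  intro m
  induction m with
  | zero => simp [shaved_zero caps hnn]
  | succ m ih =>
    intro hr
    have h1 : cwShaved caps ((m : Int) + 1) = cwShaved caps m + cwR caps m :=
      shaved_succ caps m (by positivity) hnn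
    have h2 : 1 ≤ cwR caps m := hr m (by positivity) (by push_cast; omega)
    have h3 := ih (fun j hj hjm => hr j hj (by push_cast at hjm ⊢; omega))
    push_cast
    omega

theorem k_lt_D (caps : List Int) (hnn : ∀ c ∈ caps, 0 ≤ c) (k D : Int) (hk : 0 ≤ k)
    (h1 : cwShaved caps k < D) (h2 : D ≤ cwShaved caps (k + 1)) : k < D := by
  have hr : ∀ j : Int, 0 ≤ j → j < k → 1 ≤ cwR caps j := by
    intro j hj hjk
    by_contra hcon
    have hr0 : cwR caps j = 0 := le_antisymm (by omega) (cwR_nonneg caps j)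
    have := shaved_add_nat caps hnn j hj hr0 (k + 1 - j).toNat
    rw [show j + ((k + 1 - j).toNat : Int) = k + 1 by omega] at this
    have := shaved_mono caps (show j ≤ k by omega)
    omega
  have hm := shaved_ge_self caps hnn k.toNat (fun j hj hjm => hr j hj (by omega))
  rw [show ((k.toNat : Int)) = k by omega] at hm
  omega

theorem range_filter_getD_length (xs : List Int) (P : Int → Bool) :
    ((List.range xs.length).filter (fun i => P (xs.getD i 0))).length
      = (xs.filter P).length := by
  induction xs with
  | nil => simp
  | cons x t ih =>
    rw [show (x :: t).length = t.length + 1 from rfl, List.range_succ_eq_map]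
    rw [List.filter_cons]
    have hmap : ((List.range t.length).map Nat.succ).filter (fun i => P ((x :: t).getD i 0))
        = ((List.range t.length).filter (fun i => P (t.getD i 0))).map Nat.succ := by
      rw [List.filter_map]
      rfl
    by_cases hx : P x
    · have h0 : P ((x :: t).getD 0 0) = true := by simpa using hx
      rw [if_pos h0, hmap, List.length_cons, List.length_map, ih]
      simp [List.filter_cons, hx]
    · have h0 : ¬ (P ((x :: t).getD 0 0) = true) := by simpa using hx
      rw [if_neg h0, hmap]
      rw [show ((x :: t).filter P) = t.filter P by simp [List.filter_cons, hx]]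
      simpa using ih

theorem cwLoop_zero (fuel : Nat) (minw : Int) (ws : List Int) :
    cwLoop fuel minw (ws, 0) = ws := by
  cases fuel <;> simp [cwLoop]

-- the (stable) descending index order A sorts at the start of a pass over ws
def cwSig (ws : List Int) : List Nat :=
  PySem.List.sorted (List.range ws.length) (fun i => ws.getD i 0) true

theorem cwSig_perm (ws : List Int) : (cwSig ws).Perm (List.range ws.length) :=
  PySem.List.sorted_perm _ _ _

theorem cwSig_nodup (ws : List Int) : (cwSig ws).Nodup :=
  ((cwSig_perm ws).nodup_iff).mpr (List.nodup_range)

theorem cwSig_mem (ws : List Int) (j : Nat) : j ∈ cwSig ws ↔ j < ws.length := by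
  rw [(cwSig_perm ws).mem_iff, List.mem_range]

theorem cwPass_eq_char (minw : Int) (ws : List Int) (d : Int) (hd : 0 ≤ d) :
    cwPass minw (ws, d) =
    (cwDec ws (((cwSig ws).filter (fun i => decide (ws.getD i 0 > minw))).take d.toNat),
      d - (((cwSig ws).filter (fun i => decide (ws.getD i 0 > minw))).take d.toNat).length) := by
  have h : cwPass minw (ws, d) = (cwSig ws).foldl (cwStep minw) (ws, d) := rfl
  rw [h, cwFold_char minw (cwSig ws) ws d (cwSig_nodup ws)
    (fun j hj => (cwSig_mem ws j).mp hj) hd]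

-- the filtered descending order at round p, re-expressed over caps
theorem filter_red_length (w : List Int) (minw p : Int) (hp : 0 ≤ p) :
    ((((cwSig (cwWsAt w minw p))).filter
        (fun i => decide ((cwWsAt w minw p).getD i 0 > minw))).length : Int)
      = cwR (cwCapsOf w minw) p := by
  have hperm := ((cwSig_perm (cwWsAt w minw p)).filter
    (fun i => decide ((cwWsAt w minw p).getD i 0 > minw)))
  rw [cwR]
  have hl := hperm.length_eq
  rw [hl]
  rw [wsAt_length] at *
  have hcong : (List.range w.length).filter (fun i => decide ((cwWsAt w minw p).getD i 0 > minw))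
      = (List.range w.length).filter (fun i => decide ((cwCapsOf w minw).getD i 0 > p)) := by
    apply List.filter_congr
    intro i hi
    rw [List.mem_range] at hi
    simp only [decide_eq_decide]
    exact red_iff w minw p hp i hi
  rw [hcong]
  have := range_filter_getD_length (cwCapsOf w minw) (fun c => decide (c > p))
  rw [show (cwCapsOf w minw).length = w.length by simp [cwCapsOf]] at this
  rw [this]

theorem cwDec_full (w : List Int) (minw p : Int) (hp : 0 ≤ p) (L : List Nat)
    (hnd : L.Nodup) (hmem : ∀ i, i ∈ L ↔ i < w.length ∧ (cwCapsOf w minw).getD i 0 > p) :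
    cwDec (cwWsAt w minw p) L = cwWsAt w minw (p + 1) := by
  apply List.ext_getElem
  · rw [cwDec_length, wsAt_length, wsAt_length]
  · intro i h1 h2
    rw [cwDec_length, wsAt_length] at h1
    rw [← List.getD_eq_getElem _ 0, ← List.getD_eq_getElem _ 0]
    rw [cwDec_getD L (cwWsAt w minw p) hnd
      (fun j hj => by rw [wsAt_length]; exact ((hmem j).mp hj).1)]
    rw [wsAt_getD w minw p i h1, wsAt_getD w minw (p + 1) i h1]
    have hc := caps_getD w minw i h1
    by_cases hred : (cwCapsOf w minw).getD i 0 > p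
    · rw [if_pos ((hmem i).mpr ⟨h1, hred⟩)]
      omega
    · rw [if_neg (fun hmm => hred ((hmem i).mp hmm).2)]
      omega

theorem pass_full (w : List Int) (minw p d : Int) (hp : 0 ≤ p)
    (hd : cwR (cwCapsOf w minw) p ≤ d) :
    cwPass minw (cwWsAt w minw p, d) =
      (cwWsAt w minw (p + 1), d - cwR (cwCapsOf w minw) p) := by
  have hd0 : 0 ≤ d := le_trans (cwR_nonneg _ _) hd
  rw [cwPass_eq_char minw _ d hd0]
  set F := ((cwSig (cwWsAt w minw p)).filter
    (fun i => decide ((cwWsAt w minw p).getD i 0 > minw))) with hF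
  have hlen : (F.length : Int) = cwR (cwCapsOf w minw) p := filter_red_length w minw p hp
  have htake : F.take d.toNat = F := List.take_of_length_le (by omega)
  rw [htake, hlen]
  congr 1
  apply cwDec_full w minw p hp F
  · exact (cwSig_nodup _).filter _
  · intro i
    rw [hF, List.mem_filter, cwSig_mem, wsAt_length]
    constructor
    · rintro ⟨hi, hdec⟩
      exact ⟨hi, (red_iff w minw p hp i hi).mp (by simpa using hdec)⟩
    · rintro ⟨hi, hred⟩
      exact ⟨hi, by simpa using (red_iff w minw p hp i hi).mpr hred⟩

theorem pass_last (w : List Int) (minw k rem : Int) (hk : 0 ≤ k) (hrem1 : 0 < rem)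
    (hrem2 : rem ≤ cwR (cwCapsOf w minw) k) :
    cwPass minw (cwWsAt w minw k, rem) =
      (cwDec (cwWsAt w minw k)
        (((cwSig (cwWsAt w minw k)).filter
            (fun i => decide ((cwWsAt w minw k).getD i 0 > minw))).take rem.toNat), 0) := by
  rw [cwPass_eq_char minw _ rem (by omega)]
  set F := ((cwSig (cwWsAt w minw k)).filter
    (fun i => decide ((cwWsAt w minw k).getD i 0 > minw))) with hF
  have hlen : (F.length : Int) = cwR (cwCapsOf w minw) k := filter_red_length w minw k hk
  have hlt : (F.take rem.toNat).length = rem.toNat := by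
    rw [List.length_take]
    omega
  rw [hlt]
  congr 1
  omega

theorem loop_eq (w : List Int) (minw D k : Int) (hk0 : 0 ≤ k)
    (h1 : cwShaved (cwCapsOf w minw) k < D) (h2 : D ≤ cwShaved (cwCapsOf w minw) (k + 1)) :
    ∀ (fuel : Nat) (p : Int), 0 ≤ p → p ≤ k → (k - p).toNat + 1 ≤ fuel →
      cwLoop fuel minw (cwWsAt w minw p, D - cwShaved (cwCapsOf w minw) p) =
        cwDec (cwWsAt w minw k)
          (((cwSig (cwWsAt w minw k)).filter
              (fun i => decide ((cwWsAt w minw k).getD i 0 > minw))).take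
            (D - cwShaved (cwCapsOf w minw) k).toNat) := by
  intro fuel
  have hnn := caps_nonneg w minw
  induction fuel with
  | zero => intro p _ _ hf; omega
  | succ f ih =>
    intro p hp0 hpk hf
    have hmono : cwShaved (cwCapsOf w minw) p ≤ cwShaved (cwCapsOf w minw) k :=
      shaved_mono _ hpk
    have hdpos : 0 < D - cwShaved (cwCapsOf w minw) p := by omega
    rw [show cwLoop (f + 1) minw (cwWsAt w minw p, D - cwShaved (cwCapsOf w minw) p)
        = cwLoop f minw (cwPass minw (cwWsAt w minw p, D - cwShaved (cwCapsOf w minw) p)) by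
      rw [show cwLoop (f + 1) minw (cwWsAt w minw p, D - cwShaved (cwCapsOf w minw) p)
          = if ((cwWsAt w minw p, D - cwShaved (cwCapsOf w minw) p) : List Int × Int).2 > 0 then
              cwLoop f minw (cwPass minw (cwWsAt w minw p, D - cwShaved (cwCapsOf w minw) p))
            else (cwWsAt w minw p) from rfl]
      rw [if_pos hdpos]]
    by_cases hpk2 : p = k
    · subst hpk2
      have hsucc := shaved_succ (cwCapsOf w minw) p hp0 hnn
      rw [pass_last w minw p (D - cwShaved (cwCapsOf w minw) p) hp0 hdpos (by omega)]
      exact cwLoop_zero f minw _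
    · have hpk1 : p + 1 ≤ k := by omega
      have hsucc := shaved_succ (cwCapsOf w minw) p hp0 hnn
      have hmono1 : cwShaved (cwCapsOf w minw) (p + 1) ≤ cwShaved (cwCapsOf w minw) k :=
        shaved_mono _ hpk1
      rw [pass_full w minw p (D - cwShaved (cwCapsOf w minw) p) hp0 (by omega)]
      rw [show D - cwShaved (cwCapsOf w minw) p - cwR (cwCapsOf w minw) p
          = D - cwShaved (cwCapsOf w minw) (p + 1) by omega]
      exact ih (p + 1) (by omega) hpk1 (by omega)

theorem insertBy_cons (before : Nat → Nat → Bool) (x a : Nat) (l : List Nat) :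
    PySem.List.insertBy before x (a :: l)
      = if before x a then x :: a :: l else a :: PySem.List.insertBy before x l := by
  rfl

theorem insertBy_pairwise {R : Nat → Nat → Prop} (before : Nat → Nat → Bool) (x : Nat) :
    ∀ (acc : List Nat), acc.Pairwise R →
      (∀ y ∈ acc, before x y = false → R y x) →
      (∀ y ∈ acc, before x y = true → R x y) →
      (∀ y ∈ acc, ∀ z ∈ acc, before x y = true → R y z → R x z) →
      (PySem.List.insertBy before x acc).Pairwise R := by
  intro acc
  induction acc with
  | nil => intro _ _ _ _; simpa [PySem.List.insertBy] using List.pairwise_singleton R x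
  | cons a l ih =>
    intro hacc h1 h2 h3
    rw [insertBy_cons]
    by_cases hba : before x a
    · rw [if_pos hba]
      refine List.pairwise_cons.mpr ⟨?_, hacc⟩
      intro y hy
      rcases List.mem_cons.mp hy with rfl | hyl
      · exact h2 y (by simp) hba
      · exact h3 a (by simp) y (by simp [hyl]) hba ((List.pairwise_cons.mp hacc).1 y hyl)
    · rw [if_neg hba]
      refine List.pairwise_cons.mpr ⟨?_, ?_⟩
      · intro y hy
        rcases (PySem.List.mem_insertBy before x y l).mp hy with rfl | hyl
        · exact h1 a (by simp) (by simpa using hba)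
        · exact (List.pairwise_cons.mp hacc).1 y hyl
      · exact ih (List.pairwise_cons.mp hacc).2
          (fun y hy hf => h1 y (by simp [hy]) hf)
          (fun y hy ht => h2 y (by simp [hy]) ht)
          (fun y hy z hz ht hr => h3 y (by simp [hy]) z (by simp [hz]) ht hr)

theorem foldl_insertBy_pairwise {R : Nat → Nat → Prop} (before : Nat → Nat → Bool)
    (hbR : ∀ x y : Nat, y < x → ((before x y = false → R y x) ∧ (before x y = true → R x y)))
    (htr : ∀ x y z : Nat, before x y = true → R y z → R x z) :
    ∀ (xs acc : List Nat), acc.Pairwise R → (∀ x ∈ xs, ∀ y ∈ acc, y < x) →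
      xs.Pairwise (· < ·) →
      (xs.foldl (fun acc x => PySem.List.insertBy before x acc) acc).Pairwise R := by
  intro xs
  induction xs with
  | nil => intro acc hacc _ _; simpa using hacc
  | cons x t ih =>
    intro acc hacc hlt hxs
    rw [List.foldl_cons]
    apply ih
    · exact insertBy_pairwise before x acc hacc
        (fun y hy hf => (hbR x y (hlt x (by simp) y hy)).1 hf)
        (fun y hy ht => (hbR x y (hlt x (by simp) y hy)).2 ht)
        (fun y hy z hz ht hr => htr x y z ht hr)
    · intro x' hx' y hy
      rcases (PySem.List.mem_insertBy before x y acc).mp hy with rfl | hyl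
      · exact (List.pairwise_cons.mp hxs).1 x' hx'
      · exact hlt x' (by simp [hx']) y hyl
    · exact (List.pairwise_cons.mp hxs).2

theorem sig_pairwise (ws : List Int) :
    (cwSig ws).Pairwise
      (fun a b => ws.getD b 0 < ws.getD a 0 ∨ (ws.getD a 0 = ws.getD b 0 ∧ a < b)) := by
  rw [cwSig, PySem.List.sorted_rev_eq_foldl_insertBy]
  apply foldl_insertBy_pairwise
  · intro x y hyx
    constructor
    · intro hf
      have : ¬ (ws.getD y 0 < ws.getD x 0) := by simpa using hf
      omega
    · intro ht
      have : ws.getD y 0 < ws.getD x 0 := by simpa using ht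
      omega
  · intro x y z ht hr
    have : ws.getD y 0 < ws.getD x 0 := by simpa using ht
    omega
  · exact List.Pairwise.nil
  · simp
  · exact List.pairwise_lt_range

theorem sortedB_pairwise (caps : List Int) (k : Int) :
    (PySem.List.sorted ((List.range caps.length).filter (fun i => decide (caps.getD i 0 > k)))
        (fun i => -(caps.getD i 0)) false).Pairwise
      (fun a b => caps.getD b 0 < caps.getD a 0 ∨ (caps.getD a 0 = caps.getD b 0 ∧ a < b)) := by
  rw [PySem.List.sorted_eq_foldl_insertBy]
  apply foldl_insertBy_pairwise
  · intro x y hyx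
    constructor
    · intro hf
      have : ¬ (-(caps.getD x 0) < -(caps.getD y 0)) := by simpa using hf
      omega
    · intro ht
      have : -(caps.getD x 0) < -(caps.getD y 0) := by simpa using ht
      omega
  · intro x y z ht hr
    have : -(caps.getD x 0) < -(caps.getD y 0) := by simpa using ht
    omega
  · exact List.Pairwise.nil
  · simp
  · exact List.pairwise_lt_range.filter _

theorem order_eq (w : List Int) (minw k : Int) (hk : 0 ≤ k) :
    ((cwSig (cwWsAt w minw k)).filter (fun i => decide ((cwWsAt w minw k).getD i 0 > minw)))
      = PySem.List.sorted
          ((List.range (cwCapsOf w minw).length).filter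
            (fun i => decide ((cwCapsOf w minw).getD i 0 > k)))
          (fun i => -((cwCapsOf w minw).getD i 0)) false := by
  have hcl : (cwCapsOf w minw).length = w.length := by simp [cwCapsOf]
  -- facts about members of the left list
  have hmemL : ∀ i, i ∈ ((cwSig (cwWsAt w minw k)).filter
      (fun i => decide ((cwWsAt w minw k).getD i 0 > minw))) →
      i < w.length ∧ (cwCapsOf w minw).getD i 0 > k := by
    intro i hi
    rcases List.mem_filter.mp hi with ⟨h1, h2⟩
    have hlt : i < w.length := by
      have := (cwSig_mem _ i).mp h1
      rwa [wsAt_length] at this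
    exact ⟨hlt, (red_iff w minw k hk i hlt).mp (by simpa using h2)⟩
  have hmemR : ∀ i, i ∈ PySem.List.sorted
      ((List.range (cwCapsOf w minw).length).filter
        (fun i => decide ((cwCapsOf w minw).getD i 0 > k)))
      (fun i => -((cwCapsOf w minw).getD i 0)) false →
      i < w.length ∧ (cwCapsOf w minw).getD i 0 > k := by
    intro i hi
    have := (PySem.List.sorted_perm _ _ _).mem_iff.mp hi
    rcases List.mem_filter.mp this with ⟨h1, h2⟩
    rw [List.mem_range, hcl] at h1
    exact ⟨h1, by simpa using h2⟩
  -- the common strict order on indices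
  have key_eq : ∀ i, i < w.length → (cwCapsOf w minw).getD i 0 > k →
      (cwWsAt w minw k).getD i 0 = minw + ((cwCapsOf w minw).getD i 0 - k) := by
    intro i hi hred
    rw [wsAt_getD w minw k i hi]
    rw [caps_getD w minw i hi] at hred ⊢
    omega
  apply List.Perm.eq_of_pairwise
    (le := fun a b => (cwCapsOf w minw).getD b 0 < (cwCapsOf w minw).getD a 0 ∨
      ((cwCapsOf w minw).getD a 0 = (cwCapsOf w minw).getD b 0 ∧ a < b))
  · intro a b _ _ hab hba
    omega
  · apply List.Pairwise.imp_of_mem ?_ ((sig_pairwise (cwWsAt w minw k)).filter _)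
    intro a b ha hb hR
    obtain ⟨ha1, ha2⟩ := hmemL a ha
    obtain ⟨hb1, hb2⟩ := hmemL b hb
    rw [key_eq a ha1 ha2, key_eq b hb1 hb2] at hR
    omega
  · exact sortedB_pairwise (cwCapsOf w minw) k
  · -- both sides are permutations of the same filtered range
    have hpL : ((cwSig (cwWsAt w minw k)).filter
        (fun i => decide ((cwWsAt w minw k).getD i 0 > minw))).Perm
        ((List.range w.length).filter (fun i => decide ((cwWsAt w minw k).getD i 0 > minw))) := by
      have := (cwSig_perm (cwWsAt w minw k)).filter
        (fun i => decide ((cwWsAt w minw k).getD i 0 > minw))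
      rwa [wsAt_length] at this
    have hcong : (List.range w.length).filter (fun i => decide ((cwWsAt w minw k).getD i 0 > minw))
        = (List.range (cwCapsOf w minw).length).filter
            (fun i => decide ((cwCapsOf w minw).getD i 0 > k)) := by
      rw [hcl]
      apply List.filter_congr
      intro i hi
      rw [List.mem_range] at hi
      simp only [decide_eq_decide]
      exact red_iff w minw k hk i hi
    have hpR := PySem.List.sorted_perm
      ((List.range (cwCapsOf w minw).length).filter
        (fun i => decide ((cwCapsOf w minw).getD i 0 > k)))
      (fun i => -((cwCapsOf w minw).getD i 0)) false
    exact (hpL.trans (hcong ▸ List.Perm.refl _)).trans hpR.symm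

theorem sum_pos_exists (l : List Int) : 0 < l.sum → ∃ c ∈ l, 0 < c := by
  induction l with
  | nil => simp
  | cons x t ih =>
    intro h
    by_cases hx : 0 < x
    · exact ⟨x, by simp, hx⟩
    · have hts : 0 < t.sum := by simp at h; omega
      obtain ⟨c, hc, hcpos⟩ := ih hts
      exact ⟨c, by simp [hc], hcpos⟩

-- the main branch, fully assembled
theorem main_branch (w : List Int) (mdw minw hi k : Int)
    (ht : ¬ w.sum ≤ mdw)
    (hred : w.sum - mdw ≤ (cwCapsOf w minw).sum)
    (hhi : hi = (PySem.List.max? (cwCapsOf w minw) (fun c => c)).getD 0)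
    (hkdef : k = cwSearch ((hi - 0).toNat) (cwCapsOf w minw) (w.sum - mdw) 0 hi) :
    cwLoop ((w.sum - mdw).toNat + 1) minw (w, w.sum - mdw) =
      ((w.zip (cwCapsOf w minw)).zipIdx).map
        (fun p => p.1.1 - min k p.1.2 -
          (if p.2 ∈ PySem.Set.ofList
              ((PySem.List.sorted
                ((List.range (cwCapsOf w minw).length).filter
                  (fun i => decide ((cwCapsOf w minw).getD i 0 > k)))
                (fun i => -((cwCapsOf w minw).getD i 0)) false).take
                ((w.sum - mdw - cwShaved (cwCapsOf w minw) k).toNat))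
            then 1 else 0)) := by
  set caps := cwCapsOf w minw with hcaps
  set D := w.sum - mdw with hD
  have hnn : ∀ c ∈ caps, 0 ≤ c := caps_nonneg w minw
  have hD0 : 0 < D := by omega
  have hcne : caps ≠ [] := by
    intro hnil
    rw [hnil] at hred
    simp at hred
    omega
  obtain ⟨m, hm⟩ : ∃ m, PySem.List.max? caps (fun c => c) = some m := by
    rcases h : PySem.List.max? caps (fun c => c) with _ | m
    · exact absurd ((PySem.List.max?_eq_none_iff caps _).mp h) hcne
    · exact ⟨m, rfl⟩
  have hie : hi = m := by rw [hhi, hm]; rfl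
  have hmax : ∀ c ∈ caps, c ≤ hi := by
    intro c hc
    rw [hie]
    exact PySem.List.max?_isMax hm c hc
  have hStop : D ≤ cwShaved caps hi := by rw [shaved_top caps hi hmax]; omega
  have hS0 : cwShaved caps 0 < D := by rw [shaved_zero caps hnn]; omega
  have hipos : 0 < hi := by
    obtain ⟨c, hc, hcpos⟩ := sum_pos_exists caps (by omega)
    have := hmax c hc
    omega
  obtain ⟨hk1, hk2, hk0⟩ := hkdef ▸ cwSearch_spec caps D ((hi - 0).toNat) 0 hi hS0 hStop hipos (by omega)
  have hkD : k < D := k_lt_D caps hnn k D hk0 hk1 hk2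
  have hloop := loop_eq w minw D k hk0 hk1 hk2 (D.toNat + 1) 0 (le_refl 0) (by omega) (by omega)
  rw [wsAt_zero, shaved_zero caps hnn] at hloop
  rw [show D - 0 = D by ring] at hloop
  rw [hloop]
  rw [order_eq w minw k hk0]
  set rem := D - cwShaved caps k with hrem
  set E := (PySem.List.sorted
    ((List.range caps.length).filter (fun i => decide (caps.getD i 0 > k)))
    (fun i => -(caps.getD i 0)) false).take rem.toNat with hE
  have hEsub : E.Sublist (PySem.List.sorted
      ((List.range caps.length).filter (fun i => decide (caps.getD i 0 > k)))
      (fun i => -(caps.getD i 0)) false) := List.take_sublist _ _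
  have hEnodup : E.Nodup := by
    apply hEsub.nodup
    rw [← order_eq w minw k hk0]
    exact (cwSig_nodup _).filter _
  have hEmem : ∀ i ∈ E, i < w.length ∧ caps.getD i 0 > k := by
    intro i hi2
    have hmm := hEsub.mem hi2
    rw [← order_eq w minw k hk0] at hmm
    rcases List.mem_filter.mp hmm with ⟨h1, h2⟩
    have hlt : i < w.length := by
      have := (cwSig_mem _ i).mp h1
      rwa [wsAt_length] at this
    exact ⟨hlt, (red_iff w minw k hk0 i hlt).mp (by simpa using h2)⟩
  have hcl : caps.length = w.length := by simp [hcaps, cwCapsOf]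
  apply List.ext_getElem
  · rw [cwDec_length, wsAt_length, List.length_map, List.length_zipIdx, List.length_zip, hcl]
    omega
  · intro i h1 h2
    rw [cwDec_length, wsAt_length] at h1
    rw [List.getElem_map, List.getElem_zipIdx, List.getElem_zip]
    simp only [Nat.zero_add]
    have hci : i < caps.length := by omega
    rw [show (cwDec (cwWsAt w minw k) E)[i] =
        (cwDec (cwWsAt w minw k) E).getD i 0 by
      rw [List.getD_eq_getElem]]
    rw [cwDec_getD E (cwWsAt w minw k) hEnodup
      (fun j hj => by rw [wsAt_length]; exact (hEmem j hj).1)]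
    rw [wsAt_getD w minw k i h1]
    rw [show caps[i] = caps.getD i 0 by rw [List.getD_eq_getElem]]
    rw [show w[i] = w.getD i 0 by rw [List.getD_eq_getElem]]
    have hmemE : (i ∈ PySem.Set.ofList E) ↔ i ∈ E := PySem.Set.mem_ofList E i
    by_cases hiE : i ∈ E
    · rw [if_pos hiE, if_pos (hmemE.mpr hiE)]
    · rw [if_neg hiE, if_neg (fun hc => hiE (hmemE.mp hc))]

-- ===== VERDICT (by name: the statement is the Claim_ definition above) =====
theorem clamp_widths_spec : Claim_equal_clamp_widths := by
  intro w mdw ts minw hdom hpre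
  unfold Spec_clamp_widths
  by_cases ht : w.sum ≤ mdw
  · simp [clamp_widths, clamp_widths_alt, ht]
  · have hred : w.sum - mdw ≤ (w.map (fun x => max 0 (x - minw))).sum := by
      rcases hpre with h | h
      · exact absurd h ht
      · exact h
    have hne2 : ¬ ((w.map (fun x => max 0 (x - minw))).sum < w.sum - mdw) := by omega
    simp only [clamp_widths, clamp_widths_alt]
    rw [if_neg ht, if_neg hne2, if_neg ht, if_neg hne2]
    exact main_branch w mdw minw _ _ ht (by simpa [cwCapsOf] using hred) rfl rfl
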